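-- pv_equiv track=rewrite | github.com/arcchitjain/Mistle | Old Versions/mistle_sympy.py | get_overlap_matrix
-- ===== SOURCE A (Python) =====
-- def get_overlap_matrix(theory):
--     """
--     Construct a triangular matrix that stores overlap of ith and jth clause at (i,j) position
--     :param theory: List of clauses sorted descending by their length
--     :param clause_length: List of length of clauses
--     :return: A triangular matrix that stores overlap of ith and jth clause at (i,j) position
--     """
--     overlap_matrix = []
--     n = len(theory)
--     for i, clause1 in enumerate(theory):
--         overlap_matrix.append([0] * n)
--         for j, clause2 in enumerate(theory[i + 1 :]):
--             overlap_matrix[i][i + j + 1] = len(clause1 & clause2)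
--
--     # print_2d(overlap_matrix)
--
--     return overlap_matrix
-- ===== SOURCE B (Python) =====
-- def get_overlap_matrix(theory):
--     n = len(theory)
--     overlap_matrix = [[0] * n for _ in range(n)]
--     index = {}
--     for i, clause in enumerate(theory):
--         for literal in clause:
--             index.setdefault(literal, []).append(i)
--     for occurrences in index.values():
--         m = len(occurrences)
--         for a in range(m):
--             for b in range(a + 1, m):
--                 overlap_matrix[occurrences[a]][occurrences[b]] += 1
--     return overlap_matrix
-- ===== Notes on version B (the rewrite author's own statement) =====
-- stated objective: faster
-- what changed: Replaces the quadratic pass that intersects every pair of clauses with an inverted index literal->occurrence list, incrementing pair counts only for clauses that actually share a literal.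
import Mathlib
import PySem

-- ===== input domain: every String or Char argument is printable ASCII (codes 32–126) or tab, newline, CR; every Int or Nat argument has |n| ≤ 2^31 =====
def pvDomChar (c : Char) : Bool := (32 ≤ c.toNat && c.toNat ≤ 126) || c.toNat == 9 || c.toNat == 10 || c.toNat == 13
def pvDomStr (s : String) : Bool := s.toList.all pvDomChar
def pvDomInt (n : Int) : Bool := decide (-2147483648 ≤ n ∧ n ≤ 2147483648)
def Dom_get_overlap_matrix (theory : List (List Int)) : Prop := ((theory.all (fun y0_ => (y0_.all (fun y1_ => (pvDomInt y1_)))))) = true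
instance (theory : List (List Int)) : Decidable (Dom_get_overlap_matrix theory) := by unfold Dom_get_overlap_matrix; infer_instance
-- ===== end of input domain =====

-- B replaces A's all-pairs set intersections by an inverted index literal → occurrence list,
-- incrementing a pair's count once per shared literal; same return value, proved below.
-- Each inner list represents a Python set of ints (the ports read it through PySem.Set.ofList,
-- exactly as the Pythons receive a set).

-- ===== PORT A =====
-- len(clause1 & clause2)
def interLen (c1 c2 : List Int) : Int :=
  ((PySem.Set.inter (PySem.Set.ofList c1) (PySem.Set.ofList c2)).length : Int)

def get_overlap_matrix (theory : List (List Int)) : List (List Int) :=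
  let n := theory.length
  (PySem.List.enumerate theory 0).foldl (fun om p =>
    let om' := om ++ [List.replicate n (0 : Int)]
    (PySem.List.enumerate (PySem.List.slice theory (some (p.1 + 1)) none) 0).foldl
      (fun om q =>
        om.modify p.1.toNat (fun row => row.set (p.1 + q.1 + 1).toNat (interLen p.2 q.2)))
      om') []

-- ===== PORT B =====
def get_overlap_matrix_alt (theory : List (List Int)) : List (List Int) :=
  let n := theory.length
  let om0 := List.replicate n (List.replicate n (0 : Int))
  let index : PySem.Dict Int (List Int) :=
    (PySem.List.enumerate theory 0).foldl (fun d p =>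
      (PySem.Set.ofList p.2).foldl (fun d lit => d.modify lit [] (fun v => v ++ [p.1])) d)
      PySem.Dict.empty
  index.values.foldl (fun om occ =>
    (PySem.List.pyRange 0 occ.length).foldl (fun om a =>
      (PySem.List.pyRange (a + 1) occ.length).foldl (fun om b =>
        om.modify (PySem.List.pyGetD occ a 0).toNat
          (fun row => row.modify (PySem.List.pyGetD occ b 0).toNat (· + 1))) om) om) om0

-- ===== PRECONDITION & SPEC =====
def Spec_get_overlap_matrix (theory : List (List Int)) (out : List (List Int)) : Prop := out = get_overlap_matrix_alt theory
instance (theory : List (List Int)) (out : List (List Int)) : Decidable (Spec_get_overlap_matrix theory out) := by unfold Spec_get_overlap_matrix; infer_instance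

-- ===== CLAIM (what is proved, stated in full; the proofs are below) =====
def Claim_equal_get_overlap_matrix : Prop := ∀ (theory : List (List Int)), Dom_get_overlap_matrix theory → Spec_get_overlap_matrix theory (get_overlap_matrix theory)

-- ===== LEMMAS AND PROOFS =====

theorem modify_modify_same {α : Type} (m : List α) (i : Nat) (f g : α → α) :
    (m.modify i f).modify i g = m.modify i (fun x => g (f x)) := by
  apply List.ext_getElem
  · simp
  · intro j h1 h2
    simp [List.getElem_modify]
    split <;> simp [*]

theorem foldl_modify_set (c1 : List Int) (l : List (List Int × Nat)) (i s : Nat) (m : List (List Int)) :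
    l.foldl (fun om q => om.modify i (fun row => row.set (s + q.2) (interLen c1 q.1))) m
      = m.modify i (fun r => l.foldl (fun r q => r.set (s + q.2) (interLen c1 q.1)) r) := by
  induction l generalizing m with
  | nil => show m = m.modify i id ; rw [List.modify_id]
  | cons x t ih => simp [List.foldl_cons, ih, modify_modify_same]

theorem modify_append_last {α : Type} (m : List α) (z : α) (f : α → α) :
    (m ++ [z]).modify m.length f = m ++ [f z] := by
  induction m with
  | nil => simp [List.modify]
  | cons x t ih =>
    have : (x :: t).length = t.length + 1 := rfl
    rw [List.cons_append, this, List.modify_succ_cons, ih]; simp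

theorem length_foldl_set' (l : List (List Int × Nat)) (g : List Int → Int) (s : Nat) (r : List Int) :
    (l.foldl (fun r q => r.set (s + q.2) (g q.1)) r).length = r.length := by
  induction l generalizing r with
  | nil => rfl
  | cons x t ih => simp [List.foldl_cons, ih]

theorem foldl_set_zipIdx_getElem (l : List (List Int)) (g : List Int → ℤ) (s : Nat) :
    ∀ (k : Nat) (r : List Int), s + k + l.length ≤ r.length →
    ∀ (j : Nat) (hj : j < ((l.zipIdx k).foldl (fun r q => r.set (s + q.2) (g q.1)) r).length),
    ((l.zipIdx k).foldl (fun r q => r.set (s + q.2) (g q.1)) r)[j] =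
      if h : s + k ≤ j ∧ j < s + k + l.length then g (l[j - s - k]'(by omega)) else
        r[j]'(by
          have := length_foldl_set' (l.zipIdx k) g s r
          omega) := by
  induction l with
  | nil => intro k r _ j hj; simp at hj ⊢
  | cons c t ih =>
    intro k r hlen j hj
    simp only [List.zipIdx_cons, List.foldl_cons] at hj ⊢
    have hlen' : s + (k + 1) + t.length ≤ (r.set (s + k) (g c)).length := by
      simp only [List.length_set, List.length_cons] at hlen ⊢; omega
    rw [ih (k + 1) (r.set (s + k) (g c)) hlen' j hj]
    have hfl := length_foldl_set' (t.zipIdx (k+1)) g s (r.set (s + k) (g c))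
    have hsl : (r.set (s + k) (g c)).length = r.length := List.length_set
    have hjr : j < r.length := by omega
    by_cases h1 : s + (k+1) ≤ j ∧ j < s + (k+1) + t.length
    · rw [dif_pos h1, dif_pos (by simp; omega)]
      congr 1
      rw [List.getElem_cons]
      rw [dif_neg (by omega)]
      congr 1
    · rw [dif_neg h1]
      by_cases h2 : s + k ≤ j ∧ j < s + k + (c :: t).length
      · have hje : j = s + k := by simp at h2; omega
        rw [dif_pos h2, List.getElem_set]
        simp [hje]
      · rw [dif_neg h2, List.getElem_set, if_neg (by simp at h2; omega)]

def rowA (theory : List (List Int)) (c : List Int) (i : Nat) : List Int :=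
  ((theory.drop (i+1)).zipIdx).foldl
    (fun r q => r.set (i + 1 + q.2) (interLen c q.1))
    (List.replicate theory.length 0)

theorem A_rows (theory : List (List Int)) :
    get_overlap_matrix theory = theory.zipIdx.map (fun p => rowA theory p.1 p.2) := by
  unfold get_overlap_matrix
  simp only [PySem.List.enumerate_eq_zipIdx_map, List.foldl_map]
  set F := fun (om : List (List Int)) (p : List Int × Nat) =>
    List.foldl
      (fun om q =>
        om.modify ((0:Int) + ↑p.2).toNat
          (fun row => row.set (((0:Int) + ↑p.2) + ((0:Int) + ↑q.2) + 1).toNat (interLen p.1 q.1)))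
      (om ++ [List.replicate theory.length (0 : Int)])
      ((PySem.List.slice theory (some ((0:Int) + ↑p.2 + 1)) none).zipIdx) with hF
  have stepA : ∀ (om : List (List Int)) (p : List Int × Nat), om.length = p.2 →
      F om p = om ++ [rowA theory p.1 p.2] := by
    intro om p hm
    rw [hF]
    have hsl : PySem.List.slice theory (some ((0:Int) + ↑p.2 + 1)) none =
        theory.drop (p.2 + 1) := by
      rw [PySem.List.slice_from theory (by positivity)]
      congr 1
      omega
    simp only [hsl]
    have hpos : ∀ (q : List Int × Nat),
        ((0:Int) + ↑p.2 + ((0:Int) + ↑q.2) + 1).toNat = p.2 + 1 + q.2 := by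
      intro q; omega
    have hidx : ((0:Int) + ↑p.2).toNat = p.2 := by omega
    simp only [hpos, hidx]
    rw [foldl_modify_set p.1 ((theory.drop (p.2+1)).zipIdx) p.2 (p.2 + 1)]
    rw [← hm, modify_append_last]
    rfl
  have H : ∀ (suf : List (List Int)) (k : Nat) (om : List (List Int)), om.length = k →
      List.foldl F om (suf.zipIdx k) = om ++ (suf.zipIdx k).map (fun p => rowA theory p.1 p.2) := by
    intro suf
    induction suf with
    | nil => intro k om _; simp
    | cons c t ih =>
      intro k om hm
      rw [List.zipIdx_cons, List.foldl_cons, List.map_cons]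
      rw [stepA om (c, k) hm]
      rw [ih (k+1) _ (by simp [hm])]
      simp
  simpa using H theory 0 [] rfl

def iLen (theory : List (List Int)) (p q : Nat) : Int := interLen (theory.getD p []) (theory.getD q [])

def specRow (theory : List (List Int)) (i : Nat) : List Int :=
  (List.range theory.length).map (fun q => if i < q then iLen theory i q else 0)

def specMat (theory : List (List Int)) : List (List Int) :=
  (List.range theory.length).map (specRow theory)

theorem rowA_eq_specRow (theory : List (List Int)) (i : Nat) (hi : i < theory.length) :
    rowA theory (theory[i]) i = specRow theory i := by
  unfold rowA specRow
  apply List.ext_getElem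
  · rw [length_foldl_set']
    simp
  · intro j h1 h2
    rw [foldl_set_zipIdx_getElem (theory.drop (i+1)) (fun c2 => interLen theory[i] c2) (i+1) 0
      (List.replicate theory.length 0) (by simp; omega) j h1]
    have hjn : j < theory.length := by
      have := length_foldl_set' ((theory.drop (i+1)).zipIdx) (fun c2 => interLen theory[i] c2) (i+1) (List.replicate theory.length 0)
      simp at this
      omega
    rw [List.getElem_map, List.getElem_range]
    by_cases h : i < j
    · rw [dif_pos (by simp; omega), if_pos h]
      have hd : (theory.drop (i+1))[j - (i+1) - 0]'(by simp; omega) = theory[j]'hjn := by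
        rw [List.getElem_drop]
        congr 1
        omega
      rw [hd]
      unfold iLen
      rw [List.getD_eq_getElem _ _ hi, List.getD_eq_getElem _ _ hjn]
    · rw [dif_neg (by simp; omega), if_neg h, List.getElem_replicate]

theorem A_eq_spec (theory : List (List Int)) : get_overlap_matrix theory = specMat theory := by
  rw [A_rows]
  unfold specMat
  apply List.ext_getElem
  · simp
  · intro i h1 h2
    simp only [List.getElem_map, List.getElem_zipIdx, List.getElem_range]
    have hi : i < theory.length := by simpa using h2
    simpa using rowA_eq_specRow theory i hi

def bump (om : List (List Int)) (ab : Int × Int) : List (List Int) :=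
  om.modify ab.1.toNat (fun row => row.modify ab.2.toNat (· + 1))

def LL (theory : List (List Int)) : List (Int × Int) :=
  theory.zipIdx.flatMap (fun p => (PySem.Set.ofList p.1).map (fun lit => (lit, (p.2 : Int))))

def occT (theory : List (List Int)) (lit : Int) : List Int :=
  ((LL theory).filter (fun ab => ab.1 == lit)).map (fun ab => ab.2)

def keysT (theory : List (List Int)) : List Int := PySem.Set.ofList ((LL theory).map Prod.fst)

def pairsOf : List Int → List (Int × Int)
  | [] => []
  | x :: t => t.map (fun y => (x, y)) ++ pairsOf t

theorem pyRange_natCast' (a b : Nat) :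
    PySem.List.pyRange (a : Int) (b : Int) = (List.range (b - a)).map (fun k => ((a + k : Nat) : Int)) := by
  apply List.ext_getElem
  · rw [PySem.List.length_pyRange_one]; simp
  · intro j h1 h2
    rw [PySem.List.getElem_pyRange_one]
    simp only [List.getElem_map, List.getElem_range]
    push_cast
    ring

def opsN (occ : List Int) : List (Int × Int) :=
  (List.range occ.length).flatMap (fun a =>
    (List.range (occ.length - (a+1))).map (fun k => (occ.getD a 0, occ.getD (a+1+k) 0)))

theorem map_range_getD {α β : Type} [Inhabited α] (l : List α) (f : α → β) (d : α) :
    (List.range l.length).map (fun k => f (l.getD k d)) = l.map f := by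
  apply List.ext_getElem
  · simp
  · intro j h1 h2
    simp only [List.getElem_map, List.getElem_range]
    rw [List.getD_eq_getElem _ _ (by simpa using h1)]

theorem opsN_eq_pairsOf (occ : List Int) : opsN occ = pairsOf occ := by
  induction occ with
  | nil => rfl
  | cons x t ih =>
    unfold opsN pairsOf
    rw [show (x :: t).length = t.length + 1 from rfl, List.range_succ_eq_map]
    rw [List.flatMap_cons, List.flatMap_map]
    have h1 : ∀ k, (x::t).getD (0+1+k) 0 = t.getD k 0 := by
      intro k
      rw [show 0+1+k = k+1 from by omega, List.getD_cons_succ]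
    have hhead : (List.range (t.length + 1 - (0+1))).map
        (fun k => ((x::t).getD 0 0, (x::t).getD (0+1+k) 0)) = t.map (fun y => (x, y)) := by
      simp only [h1, List.getD_cons_zero, show t.length + 1 - (0+1) = t.length from by omega]
      exact map_range_getD t (fun y => (x, y)) 0
    have htail : ∀ (a : Nat),
        (List.range (t.length + 1 - (a.succ+1))).map
          (fun k => ((x::t).getD a.succ 0, (x::t).getD (a.succ+1+k) 0)) =
        (List.range (t.length - (a+1))).map (fun k => (t.getD a 0, t.getD (a+1+k) 0)) := by
      intro a
      simp only [Nat.succ_eq_add_one, show ∀ (a : Nat), t.length + 1 - (a+1+1) = t.length - (a+1) from fun a => by omega]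
      apply List.map_congr_left
      intro k _
      rw [List.getD_cons_succ, show a+1+1+k = (a+1+k)+1 from by omega, List.getD_cons_succ]
    rw [hhead]
    congr 1
    rw [← ih]
    unfold opsN
    simp only [htail]

-- phase-2 inner double loop = fold of bump over pairsOf

theorem phase2_eq (occ : List Int) (om : List (List Int)) :
    (PySem.List.pyRange 0 occ.length).foldl (fun om a =>
      (PySem.List.pyRange (a + 1) occ.length).foldl (fun om b =>
        om.modify (PySem.List.pyGetD occ a 0).toNat
          (fun row => row.modify (PySem.List.pyGetD occ b 0).toNat (· + 1))) om) om
    = (pairsOf occ).foldl bump om := by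
  rw [← opsN_eq_pairsOf]
  unfold opsN
  rw [List.foldl_flatMap]
  simp only [List.foldl_map]
  rw [PySem.List.pyRange_zero_natCast occ.length]
  rw [List.foldl_map]
  simp only [show ∀ (a : Nat), ((a : Int) + 1) = (((a+1 : Nat)) : Int) from fun a => by push_cast; ring]
  simp only [pyRange_natCast']
  simp only [List.foldl_map]
  simp only [PySem.List.pyGetD_natCast]
  simp only [bump]

theorem B_shape (theory : List (List Int)) :
    get_overlap_matrix_alt theory =
      (((keysT theory).map (occT theory)).flatMap pairsOf).foldl bump
        (List.replicate theory.length (List.replicate theory.length 0)) := by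
  unfold get_overlap_matrix_alt
  simp only [PySem.List.enumerate_eq_zipIdx_map, List.foldl_map, zero_add]
  have hidx : (theory.zipIdx.foldl (fun d (p : List Int × Nat) =>
        (PySem.Set.ofList p.1).foldl (fun d lit => d.modify lit [] (fun v => v ++ [(p.2 : Int)])) d)
        PySem.Dict.empty)
      = (LL theory).foldl (fun d q => d.modify q.1 [] (fun v => v ++ [q.2])) PySem.Dict.empty := by
    unfold LL
    rw [List.foldl_flatMap]
    simp only [List.foldl_map]
  rw [hidx]
  set D := (LL theory).foldl (fun d q => d.modify q.1 [] (fun v => v ++ [q.2])) PySem.Dict.empty with hD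
  have hkeys : D.keys = keysT theory := by
    rw [hD, PySem.Dict.keys_foldl_modify_key (LL theory) Prod.fst [] (fun _ q => (fun v => v ++ [q.2]))]
    rfl
  have hnd : D.keys.Nodup := by rw [hkeys]; exact PySem.Set.nodup_ofList _
  have hocc : ∀ lit, D.getD lit [] = occT theory lit := by
    intro lit
    rw [hD, PySem.Dict.getD_foldl_modify_append (LL theory) PySem.Dict.empty lit]
    simp [occT]
  have hvals : D.values = (keysT theory).map (occT theory) := by
    rw [PySem.Dict.values_eq_map_keys D hnd []]
    rw [hkeys]
    exact List.map_congr_left (fun k _ => hocc k)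
  rw [hvals]
  rw [List.foldl_flatMap]
  apply PySem.List.foldl_congr_mem
  intro om occ _
  exact phase2_eq occ om

theorem getD_modify' {α : Type} (l : List α) (i : Nat) (f : α → α) (j : Nat) (d : α) :
    (l.modify i f).getD j d = if i = j ∧ j < l.length then f (l.getD j d) else l.getD j d := by
  rw [List.getD_eq_getElem?_getD, List.getD_eq_getElem?_getD, List.getElem?_modify]
  by_cases hj : j < l.length
  · rw [List.getElem?_eq_getElem hj]
    by_cases hij : i = j <;> simp [hij, hj, List.getD_eq_getElem?_getD, List.getElem?_eq_getElem hj]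
  · rw [List.getElem?_eq_none (by omega)]
    simp [hj]

theorem bump_foldl_length (ops : List (Int × Int)) (om : List (List Int)) :
    (ops.foldl bump om).length = om.length := by
  induction ops generalizing om with
  | nil => rfl
  | cons ab t ih => rw [List.foldl_cons, ih]; simp [bump]

theorem bump_foldl_row_length (ops : List (Int × Int)) (om : List (List Int)) (p : Nat) :
    ((ops.foldl bump om).getD p []).length = (om.getD p []).length := by
  induction ops generalizing om with
  | nil => rfl
  | cons ab t ih =>
    rw [List.foldl_cons, ih]
    show ((bump om ab).getD p []).length = _
    unfold bump
    rw [getD_modify']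
    split <;> simp

theorem bump_foldl_entry (ops : List (Int × Int)) (om : List (List Int)) (p q : Nat)
    (hA : ∀ ab ∈ ops, ab.1.toNat < om.length)
    (hB : ∀ ab ∈ ops, ab.2.toNat < (om.getD ab.1.toNat []).length) :
    ((ops.foldl bump om).getD p []).getD q 0 =
      (om.getD p []).getD q 0 + (ops.countP (fun ab => ab.1.toNat == p && ab.2.toNat == q) : Int) := by
  induction ops generalizing om with
  | nil => simp
  | cons ab t ih =>
    rw [List.foldl_cons]
    have hlen : (bump om ab).length = om.length := by simp [bump]
    have hrow : ∀ j, ((bump om ab).getD j []).length = (om.getD j []).length := by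
      intro j
      unfold bump
      rw [getD_modify']
      split <;> simp
    rw [ih (bump om ab) (fun x hx => by rw [hlen]; exact hA x (List.mem_cons_of_mem _ hx))
      (fun x hx => by rw [hrow]; exact hB x (List.mem_cons_of_mem _ hx))]
    have ha := hA ab List.mem_cons_self
    have hb := hB ab List.mem_cons_self
    show ((bump om ab).getD p []).getD q 0 + _ = _
    unfold bump
    rw [getD_modify']
    rw [List.countP_cons]
    by_cases h1 : ab.1.toNat = p
    · rw [if_pos ⟨h1, h1 ▸ ha⟩, getD_modify']
      by_cases h2 : ab.2.toNat = q
      · rw [if_pos ⟨h2, by rw [← h1, ← h2] at *; exact hb⟩]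
        simp [h1, h2]
        push_cast
        ring
      · rw [if_neg (by tauto)]
        simp [h1, h2]
    · rw [if_neg (by tauto)]
      simp [h1]

theorem mem_pairsOf {occ : List Int} {ab : Int × Int} (h : ab ∈ pairsOf occ) :
    ab.1 ∈ occ ∧ ab.2 ∈ occ := by
  induction occ with
  | nil => simp [pairsOf] at h
  | cons x t ih =>
    simp only [pairsOf, List.mem_append, List.mem_map] at h
    rcases h with ⟨y, hy, rfl⟩ | h
    · exact ⟨List.mem_cons_self, List.mem_cons_of_mem _ hy⟩
    · exact ⟨List.mem_cons_of_mem _ (ih h).1, List.mem_cons_of_mem _ (ih h).2⟩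

theorem pairsOf_fst_lt {occ : List Int} (hso : occ.Pairwise (· < ·)) {ab : Int × Int}
    (h : ab ∈ pairsOf occ) : ab.1 < ab.2 := by
  induction occ with
  | nil => simp [pairsOf] at h
  | cons x t ih =>
    simp only [pairsOf, List.mem_append, List.mem_map] at h
    rcases h with ⟨y, hy, rfl⟩ | h
    · exact (List.pairwise_cons.mp hso).1 y hy
    · exact ih (List.pairwise_cons.mp hso).2 h

theorem count_pairsOf_pos (occ : List Int) (hso : occ.Pairwise (· < ·)) (p q : Int) (hpq : p < q) :
    (pairsOf occ).count (p, q) = if p ∈ occ ∧ q ∈ occ then 1 else 0 := by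
  induction occ with
  | nil => simp [pairsOf]
  | cons x t ih =>
    obtain ⟨hx, hso'⟩ := List.pairwise_cons.mp hso
    have hndt : t.Nodup := (hso'.imp (fun h => ne_of_lt h))
    rw [pairsOf, List.count_append]
    have hmap : (t.map (fun y => (x, y))).count (p, q) = if x = p then t.count q else 0 := by
      by_cases hxp : x = p
      · subst hxp
        rw [List.count_eq_countP, List.countP_map, if_pos rfl, List.count_eq_countP]
        apply List.countP_congr
        intro y _
        simp
      · rw [if_neg hxp, List.count_eq_zero]
        intro hmem
        obtain ⟨y, _, hey⟩ := List.mem_map.mp hmem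
        exact hxp (congrArg Prod.fst hey)
    rw [hmap, ih hso']
    by_cases hxp : x = p
    · subst hxp
      have hpt : x ∉ t := fun h => absurd (hx x h) (lt_irrefl x)
      rw [if_pos rfl, if_neg (fun (h : x ∈ t ∧ q ∈ t) => hpt h.1)]
      by_cases hq : q ∈ t
      · rw [List.count_eq_one_of_mem hndt hq,
          if_pos ⟨List.mem_cons_self, List.mem_cons_of_mem _ hq⟩]
      · rw [List.count_eq_zero_of_not_mem hq, if_neg (by
          intro ⟨_, hq2⟩
          rcases List.mem_cons.mp hq2 with h | h
          · omega
          · exact hq h)]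
    · rw [if_neg hxp]
      by_cases hp : p ∈ t
      · have hxq : q ≠ x := by
          intro h
          have := hx p hp
          omega
        by_cases hq : q ∈ t
        · rw [if_pos ⟨hp, hq⟩, if_pos ⟨List.mem_cons_of_mem _ hp, List.mem_cons_of_mem _ hq⟩]
        · rw [if_neg (by tauto), if_neg (by
            intro ⟨_, hq2⟩
            rcases List.mem_cons.mp hq2 with h | h
            · exact hxq h
            · exact hq h)]
      · rw [if_neg (by tauto), if_neg (by
          intro ⟨hp2, _⟩
          rcases List.mem_cons.mp hp2 with h | h
          · exact hxp h.symm
          · exact hp h)]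

theorem count_pairsOf_nonpos (occ : List Int) (hso : occ.Pairwise (· < ·)) (p q : Int) (hqp : q ≤ p) :
    (pairsOf occ).count (p, q) = 0 := by
  rw [List.count_eq_zero]
  intro h
  have := pairsOf_fst_lt hso h
  simp at this
  omega

theorem flatMap_if_singleton {α β : Type} (l : List α) (P : α → Bool) (g : α → β) :
    l.flatMap (fun a => if P a then [g a] else []) = (l.filter P).map g := by
  induction l with
  | nil => rfl
  | cons x t ih =>
    rw [List.flatMap_cons, List.filter_cons, ih]
    by_cases h : P x <;> simp [h]

theorem occT_eq (theory : List (List Int)) (lit : Int) :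
    occT theory lit =
      (theory.zipIdx.filter (fun p => decide (lit ∈ PySem.Set.ofList p.1))).map
        (fun p => ((p.2 : Nat) : Int)) := by
  unfold occT LL
  rw [List.filter_flatMap, List.map_flatMap]
  have hinner : ∀ (p : List Int × Nat),
      (((PySem.Set.ofList p.1).map (fun lit' => (lit', (p.2 : Int)))).filter
          (fun ab => ab.1 == lit)).map (fun ab => ab.2)
        = if decide (lit ∈ PySem.Set.ofList p.1) then [((p.2 : Nat) : Int)] else [] := by
    intro p
    rw [List.filter_map]
    have : ((fun ab : Int × Int => ab.1 == lit) ∘ (fun lit' => (lit', (p.2 : Int)))) =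
        (fun lit' => lit' == lit) := rfl
    rw [this, List.filter_beq]
    by_cases h : lit ∈ PySem.Set.ofList p.1
    · rw [List.count_eq_one_of_mem (PySem.Set.nodup_ofList p.1) h]
      simp [h]
    · rw [List.count_eq_zero_of_not_mem h]
      simp [h]
  calc (theory.zipIdx.flatMap fun p =>
        (((PySem.Set.ofList p.1).map (fun lit' => (lit', (p.2:Int)))).filter
          (fun ab => ab.1 == lit)).map (fun ab => ab.2))
      = theory.zipIdx.flatMap (fun p => if decide (lit ∈ PySem.Set.ofList p.1) then [((p.2:Nat):Int)] else []) := by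
        exact List.flatMap_congr (fun p _ => hinner p)
    _ = _ := flatMap_if_singleton _ _ _

theorem pairwise_occT (theory : List (List Int)) (lit : Int) :
    (occT theory lit).Pairwise (· < ·) := by
  rw [occT_eq]
  rw [List.pairwise_map]
  apply List.Pairwise.filter
  rw [List.pairwise_iff_getElem]
  intro i j hi hj hij
  simp only [List.getElem_zipIdx]
  simp
  omega

theorem mem_occT (theory : List (List Int)) (lit : Int) (x : Int) :
    x ∈ occT theory lit ↔ ∃ k : Nat, k < theory.length ∧ x = (k : Int) ∧ lit ∈ theory.getD k [] := by
  rw [occT_eq]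
  simp only [List.mem_map, List.mem_filter]
  constructor
  · rintro ⟨p, ⟨hmem, hin⟩, rfl⟩
    obtain ⟨c, i⟩ := p
    obtain ⟨hk1, hk2, hk3⟩ := List.mem_zipIdx hmem
    refine ⟨i, by omega, rfl, ?_⟩
    rw [List.getD_eq_getElem _ _ (by omega : i < theory.length)]
    have := (PySem.Set.mem_ofList (y := lit) (xs := c)).mp (by simpa using hin)
    rw [hk3] at this
    simpa using this
  · rintro ⟨k, hk, rfl, hmem⟩
    refine ⟨(theory[k], k), ⟨?_, ?_⟩, rfl⟩
    · exact List.mem_zipIdx_iff_getElem?.mpr (by simpa using List.getElem?_eq_getElem hk)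
    · simp only [decide_eq_true_eq, PySem.Set.mem_ofList]
      rw [List.getD_eq_getElem _ _ hk] at hmem
      exact hmem

theorem keysT_nodup (theory : List (List Int)) : (keysT theory).Nodup :=
  PySem.Set.nodup_ofList _

theorem mem_keysT (theory : List (List Int)) (x : Int) :
    x ∈ keysT theory ↔ ∃ k : Nat, k < theory.length ∧ x ∈ theory.getD k [] := by
  unfold keysT LL
  rw [PySem.Set.mem_ofList]
  constructor
  · intro h
    obtain ⟨ab, hab, rfl⟩ := List.mem_map.mp h
    obtain ⟨p, hp, hin⟩ := List.mem_flatMap.mp hab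
    obtain ⟨c, i⟩ := p
    obtain ⟨_, hk2, hk3⟩ := List.mem_zipIdx hp
    obtain ⟨lit, hlit, rfl⟩ := List.mem_map.mp hin
    refine ⟨i, by omega, ?_⟩
    rw [List.getD_eq_getElem _ _ (by omega : i < theory.length)]
    have := (PySem.Set.mem_ofList (y := lit) (xs := c)).mp hlit
    rw [hk3] at this
    simpa using this
  · rintro ⟨k, hk, hmem⟩
    refine List.mem_map.mpr ⟨(x, (k : Int)), List.mem_flatMap.mpr ⟨(theory[k], k), ?_, ?_⟩, rfl⟩
    · exact List.mem_zipIdx_iff_getElem?.mpr (by simpa using List.getElem?_eq_getElem hk)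
    · refine List.mem_map.mpr ⟨x, ?_, rfl⟩
      rw [PySem.Set.mem_ofList]
      rw [List.getD_eq_getElem _ _ hk] at hmem
      exact hmem

theorem sum_ite_eq_countP {α : Type} (l : List α) (P : α → Bool) :
    (l.map (fun x => if P x then 1 else 0)).sum = l.countP P := by
  induction l with
  | nil => rfl
  | cons x t ih =>
    rw [List.map_cons, List.sum_cons, ih, List.countP_cons]
    by_cases h : P x <;> simp [h, Nat.add_comm]

theorem occT_nonneg (theory : List (List Int)) (lit : Int) :
    ∀ x ∈ occT theory lit, 0 ≤ x ∧ x.toNat < theory.length := by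
  intro x hx
  obtain ⟨k, hk, rfl, _⟩ := (mem_occT theory lit x).mp hx
  constructor
  · positivity
  · simpa using hk

theorem B_eq_spec (theory : List (List Int)) : get_overlap_matrix_alt theory = specMat theory := by
  rw [B_shape]
  set n := theory.length with hn
  set OPS := (((keysT theory).map (occT theory)).flatMap pairsOf) with hOPS
  set om0 := List.replicate n (List.replicate n (0 : Int)) with hom0
  have hOPSmem : ∀ ab ∈ OPS, (0 ≤ ab.1 ∧ ab.1.toNat < n) ∧ (0 ≤ ab.2 ∧ ab.2.toNat < n) := by
    intro ab hab
    rw [hOPS] at hab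
    obtain ⟨occ, hocc, habp⟩ := List.mem_flatMap.mp hab
    obtain ⟨lit, _, rfl⟩ := List.mem_map.mp hocc
    obtain ⟨h1, h2⟩ := mem_pairsOf habp
    exact ⟨occT_nonneg theory lit _ h1, occT_nonneg theory lit _ h2⟩
  have hrowlen : ∀ j : Nat, (om0.getD j []).length = if j < n then n else 0 := by
    intro j
    by_cases hj : j < n
    · rw [List.getD_eq_getElem _ _ (by rw [hom0]; simpa using hj), if_pos hj]
      simp [hom0]
    · rw [List.getD_eq_getElem?_getD, List.getElem?_eq_none (by rw [hom0]; simpa using hj)]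
      simp [hj]
  apply List.ext_getElem
  · rw [bump_foldl_length]
    simp [hom0, specMat, hn]
  · intro p hp1 hp2
    have hpn : p < n := by
      have h := hp1
      rw [bump_foldl_length] at h
      simpa [hom0] using h
    apply List.ext_getElem
    · have h1 := bump_foldl_row_length OPS om0 p
      rw [List.getD_eq_getElem _ _ hp1] at h1
      rw [h1, hrowlen p, if_pos hpn]
      simp [specMat, specRow, hn]
    · intro q hq1 hq2
      have hqn : q < n := by
        have h1 := bump_foldl_row_length OPS om0 p
        rw [List.getD_eq_getElem _ _ hp1] at h1
        rw [h1, hrowlen p, if_pos hpn] at hq1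
        exact hq1
      -- right-hand side
      have hrhs : ((specMat theory)[p]'hp2)[q]'hq2 =
          if p < q then iLen theory p q else 0 := by
        simp [specMat, specRow]
      rw [hrhs]
      -- left-hand side via the counting lemma
      have hentry := bump_foldl_entry OPS om0 p q
        (fun ab hab => by rw [hom0]; simpa using (hOPSmem ab hab).1.2)
        (fun ab hab => by
          rw [hrowlen ab.1.toNat, if_pos (hOPSmem ab hab).1.2]
          exact (hOPSmem ab hab).2.2)
      have hL : ((OPS.foldl bump om0)[p]'hp1)[q]'hq1 =
          ((OPS.foldl bump om0).getD p []).getD q 0 := by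
        rw [List.getD_eq_getElem _ _ hp1, List.getD_eq_getElem _ _ hq1]
      rw [hL, hentry]
      have hz : (om0.getD p []).getD q 0 = 0 := by
        have hrp : om0.getD p [] = List.replicate n (0 : Int) := by
          rw [hom0, List.getD_eq_getElem _ _ (by simpa using hpn)]
          simp
        rw [hrp, List.getD_eq_getElem _ _ (by simpa using hqn)]
        simp
      rw [hz, zero_add]
      -- countP over the flatMap
      rw [hOPS, List.countP_flatMap, List.map_map]
      have hcong : ∀ lit ∈ keysT theory,
          ((List.countP (fun ab => ab.1.toNat == p && ab.2.toNat == q) ∘ pairsOf) ∘ occT theory) lit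
            = if p < q ∧ lit ∈ theory.getD p [] ∧ lit ∈ theory.getD q [] then 1 else 0 := by
        intro lit _
        show List.countP _ (pairsOf (occT theory lit)) = _
        have hso := pairwise_occT theory lit
        have hcnt : List.countP (fun ab => ab.1.toNat == p && ab.2.toNat == q)
            (pairsOf (occT theory lit)) = (pairsOf (occT theory lit)).count ((p : Int), (q : Int)) := by
          rw [List.count_eq_countP]
          apply List.countP_congr
          intro ab hab
          obtain ⟨h1, h2⟩ := mem_pairsOf hab
          obtain ⟨hn1, _⟩ := occT_nonneg theory lit _ h1
          obtain ⟨hn2, _⟩ := occT_nonneg theory lit _ h2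
          simp only [Bool.and_eq_true, beq_iff_eq, Prod.ext_iff]
          constructor
          · rintro ⟨ha, hb⟩
            constructor <;> omega
          · rintro ⟨ha, hb⟩
            constructor <;> omega
        rw [hcnt]
        by_cases hpq : p < q
        · rw [count_pairsOf_pos _ hso _ _ (by exact_mod_cast hpq)]
          have hiff : ((p : Int) ∈ occT theory lit ∧ (q : Int) ∈ occT theory lit) ↔
              (p < q ∧ lit ∈ theory.getD p [] ∧ lit ∈ theory.getD q []) := by
            rw [mem_occT, mem_occT]
            constructor
            · rintro ⟨⟨k1, _, hk1, hm1⟩, ⟨k2, _, hk2, hm2⟩⟩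
              have e1 : k1 = p := by exact_mod_cast hk1.symm
              have e2 : k2 = q := by exact_mod_cast hk2.symm
              exact ⟨hpq, e1 ▸ hm1, e2 ▸ hm2⟩
            · rintro ⟨_, h1, h2⟩
              exact ⟨⟨p, hpn, rfl, h1⟩, ⟨q, hqn, rfl, h2⟩⟩
          rw [if_congr hiff rfl rfl]
        · rw [count_pairsOf_nonpos _ hso _ _ (by exact_mod_cast Nat.le_of_not_lt hpq)]
          rw [if_neg (by tauto)]
      rw [List.map_congr_left hcong]
      by_cases hpq : p < q
      · rw [if_pos hpq]
        have hcong2 : ∀ lit ∈ keysT theory,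
            (if p < q ∧ lit ∈ theory.getD p [] ∧ lit ∈ theory.getD q [] then 1 else 0)
              = (if (decide (lit ∈ theory.getD p []) && decide (lit ∈ theory.getD q [])) then (1:Nat) else 0) := by
          intro lit _
          by_cases h1 : lit ∈ theory.getD p [] <;> by_cases h2 : lit ∈ theory.getD q [] <;>
            simp [h1, h2, hpq]
        rw [List.map_congr_left hcong2, sum_ite_eq_countP]
        unfold iLen interLen
        congr 1
        rw [List.countP_eq_length_filter]
        have hperm : ((keysT theory).filter
            (fun lit => decide (lit ∈ theory.getD p []) && decide (lit ∈ theory.getD q []))).Perm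
            (PySem.Set.inter (PySem.Set.ofList (theory.getD p []))
              (PySem.Set.ofList (theory.getD q []))) := by
          rw [List.perm_ext_iff_of_nodup ((keysT_nodup theory).filter _)
            (PySem.Set.nodup_inter _ _ (PySem.Set.nodup_ofList _))]
          intro a
          rw [List.mem_filter, PySem.Set.mem_inter, PySem.Set.mem_ofList, PySem.Set.mem_ofList]
          constructor
          · rintro ⟨_, h⟩
            simp at h
            exact h
          · rintro ⟨h1, h2⟩
            refine ⟨(mem_keysT theory a).mpr ⟨p, hpn, h1⟩, ?_⟩
            simp only [Bool.and_eq_true, decide_eq_true_eq]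
            exact ⟨h1, h2⟩
        exact hperm.length_eq
      · rw [if_neg hpq]
        have hcong3 : ∀ lit ∈ keysT theory,
            (if p < q ∧ lit ∈ theory.getD p [] ∧ lit ∈ theory.getD q [] then 1 else 0) = (0:Nat) := by
          intro lit _
          rw [if_neg (by tauto)]
        rw [List.map_congr_left hcong3]
        simp

-- ===== VERDICT (by name: the statement is the Claim_ definition above) =====
theorem get_overlap_matrix_spec : Claim_equal_get_overlap_matrix := by
  intro theory _
  unfold Spec_get_overlap_matrix
  rw [A_eq_spec, B_eq_spec]
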